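-- pv_equiv track=rewrite | github.com/mikeb55/creative-engines | engines/composition_evaluator/motif_coherence.py | _find_repeated_cells
-- ===== SOURCE A (Python) =====
-- from typing import Any, Dict, List, Tuple
--
-- def _find_repeated_cells(intervals: List[int], cell_len: int = 3) -> int:
--     if len(intervals) < cell_len:
--         return 0
--     count = 0
--     for i in range(len(intervals) - cell_len):
--         cell = tuple(intervals[i:i + cell_len])
--         for j in range(i + cell_len, len(intervals) - cell_len + 1):
--             if tuple(intervals[j:j + cell_len]) == cell:
--                 count += 1
--                 break
--     return count
-- ===== SOURCE B (Python) =====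
-- def _find_repeated_cells(intervals, cell_len=3):
--     n = len(intervals)
--     if n < cell_len:
--         return 0
--     count = 0
--     seen = set()
--     next_j = n - cell_len  # windows at j in [i + cell_len, n - cell_len] are kept in `seen`
--     for i in reversed(range(n - cell_len)):
--         while next_j >= i + cell_len:
--             seen.add(tuple(intervals[next_j:next_j + cell_len]))
--             next_j -= 1
--         if tuple(intervals[i:i + cell_len]) in seen:
--             count += 1
--     return count
-- ===== Notes on version B (the rewrite author's own statement) =====
-- stated objective: alternative
-- what changed: A rescans all later windows for every position (nested loops with break); B sweeps the positions once in descending order, maintaining a set of the windows that are already valid later occurrences and testing membership, trading A's repeated rescans for one pass that builds every window once.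
import Mathlib
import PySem

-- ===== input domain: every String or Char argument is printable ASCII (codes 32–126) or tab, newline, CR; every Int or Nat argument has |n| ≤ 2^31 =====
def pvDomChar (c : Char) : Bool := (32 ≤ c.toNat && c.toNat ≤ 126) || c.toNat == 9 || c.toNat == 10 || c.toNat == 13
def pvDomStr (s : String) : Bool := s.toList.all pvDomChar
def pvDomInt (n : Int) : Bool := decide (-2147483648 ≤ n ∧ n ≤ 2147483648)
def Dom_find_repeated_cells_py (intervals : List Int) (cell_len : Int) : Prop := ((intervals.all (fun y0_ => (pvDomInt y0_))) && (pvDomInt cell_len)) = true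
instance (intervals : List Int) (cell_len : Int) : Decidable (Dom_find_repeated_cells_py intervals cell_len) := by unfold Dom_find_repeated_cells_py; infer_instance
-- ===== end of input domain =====

-- B replaces A's nested rescan of all later windows by a single descending sweep that
-- maintains a set of the already-valid later windows and tests membership (objective: alternative).

-- ===== PORT A =====
-- the inner 'for j in range(i + cell_len, len - cell_len + 1): if tuple(...) == cell: count += 1; break',
-- as a j-counter recursion that stops at the first match exactly as the break does
def pvInnerA (intervals : List Int) (cell_len : Int) (cell : List Int) (j stop : Int) : Bool :=
  if h : j < stop then
    if PySem.List.slice intervals (some j) (some (j + cell_len)) == cell then true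
    else pvInnerA intervals cell_len cell (j + 1) stop
  else false
termination_by (stop - j).toNat
decreasing_by omega

def find_repeated_cells_py (intervals : List Int) (cell_len : Int) : Int :=
  if (intervals.length : Int) < cell_len then 0
  else
    (PySem.List.pyRange 0 ((intervals.length : Int) - cell_len) 1).foldl
      (fun count i =>
        let cell := PySem.List.slice intervals (some i) (some (i + cell_len))
        if pvInnerA intervals cell_len cell (i + cell_len) ((intervals.length : Int) - cell_len + 1)
        then count + 1 else count)
      0

-- ===== PORT B =====
-- Source B's 'while next_j >= i + cell_len: seen.add(window(next_j)); next_j -= 1'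
def pvDrain (intervals : List Int) (cell_len : Int) (seen : PySem.Set (List Int))
    (next_j lo : Int) : PySem.Set (List Int) × Int :=
  if h : lo ≤ next_j then
    pvDrain intervals cell_len
      (PySem.Set.add seen (PySem.List.slice intervals (some next_j) (some (next_j + cell_len))))
      (next_j - 1) lo
  else (seen, next_j)
termination_by (next_j - lo + 1).toNat
decreasing_by omega

-- the body of Source B's 'for i in reversed(range(n - cell_len))' loop, state (count, seen, next_j)
def pvStep (intervals : List Int) (cell_len : Int)
    (st : Int × PySem.Set (List Int) × Int) (i : Int) : Int × PySem.Set (List Int) × Int :=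
  let r := pvDrain intervals cell_len st.2.1 st.2.2 (i + cell_len)
  if PySem.Set.contains r.1 (PySem.List.slice intervals (some i) (some (i + cell_len)))
  then (st.1 + 1, r.1, r.2) else (st.1, r.1, r.2)

def find_repeated_cells_py_alt (intervals : List Int) (cell_len : Int) : Int :=
  if (intervals.length : Int) < cell_len then 0
  else
    (((PySem.List.pyRange 0 ((intervals.length : Int) - cell_len) 1).reverse).foldl
      (pvStep intervals cell_len)
      (0, (PySem.Set.empty : PySem.Set (List Int)), (intervals.length : Int) - cell_len)).1

-- ===== PRECONDITION & SPEC =====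
def Spec_find_repeated_cells_py (intervals : List Int) (cell_len : Int) (out : Int) : Prop := out = find_repeated_cells_py_alt intervals cell_len
instance (intervals : List Int) (cell_len : Int) (out : Int) : Decidable (Spec_find_repeated_cells_py intervals cell_len out) := by unfold Spec_find_repeated_cells_py; infer_instance

-- ===== CLAIM (what is proved, stated in full; the proofs are below) =====
def Claim_equal_find_repeated_cells_py : Prop := ∀ (intervals : List Int) (cell_len : Int), Dom_find_repeated_cells_py intervals cell_len → Spec_find_repeated_cells_py intervals cell_len (find_repeated_cells_py intervals cell_len)

-- ===== LEMMAS AND PROOFS =====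

-- the window at position j
def pvW (intervals : List Int) (cell_len j : Int) : List Int :=
  PySem.List.slice intervals (some j) (some (j + cell_len))

-- characterisation of the while-loop: members added are exactly the windows at j ∈ [lo, next_j],
-- and the final pointer
lemma pvDrain_spec (intervals : List Int) (cell_len lo : Int) :
    ∀ (n : Nat) (next_j : Int), (next_j - lo + 1).toNat ≤ n →
      ∀ (seen : PySem.Set (List Int)),
        (∀ x, x ∈ (pvDrain intervals cell_len seen next_j lo).1 ↔
          (x ∈ seen ∨ ∃ j : Int, lo ≤ j ∧ j ≤ next_j ∧ x = pvW intervals cell_len j)) ∧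
        (pvDrain intervals cell_len seen next_j lo).2 = if lo ≤ next_j then lo - 1 else next_j := by
  intro n
  induction n with
  | zero =>
      intro next_j hn seen
      have h : ¬ lo ≤ next_j := by omega
      rw [pvDrain]
      simp only [dif_neg h, if_neg h]
      refine ⟨fun x => ⟨Or.inl, ?_⟩, by trivial⟩
      rintro (hx | ⟨j, h1, h2, _⟩)
      · exact hx
      · omega
  | succ n ih =>
      intro next_j hn seen
      by_cases h : lo ≤ next_j
      · rw [pvDrain]
        simp only [dif_pos h]
        obtain ⟨hmem, hsnd⟩ := ih (next_j - 1) (by omega)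
          (PySem.Set.add seen (PySem.List.slice intervals (some next_j) (some (next_j + cell_len))))
        refine ⟨fun x => ?_, ?_⟩
        · rw [hmem x, PySem.Set.mem_add]
          constructor
          · rintro ((hx | hx) | ⟨j, h1, h2, h3⟩)
            · exact Or.inl hx
            · exact Or.inr ⟨next_j, h, le_refl _, by simpa [pvW] using hx⟩
            · exact Or.inr ⟨j, h1, by omega, h3⟩
          · rintro (hx | ⟨j, h1, h2, h3⟩)
            · exact Or.inl (Or.inl hx)
            · by_cases hj : j = next_j
              · subst hj; exact Or.inl (Or.inr (by simpa [pvW] using h3))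
              · exact Or.inr ⟨j, h1, by omega, h3⟩
        · rw [hsnd, if_pos h]
          split_ifs with h2
          · rfl
          · omega
      · rw [pvDrain]
        simp only [dif_neg h, if_neg h]
        refine ⟨fun x => ⟨Or.inl, ?_⟩, by trivial⟩
        rintro (hx | ⟨j, h1, h2, _⟩)
        · exact hx
        · omega

-- A's inner break-loop searches the same range as '(pyRange …).any'
lemma pvInnerA_eq_any (intervals : List Int) (cell_len : Int) (cell : List Int) (stop : Int) :
    ∀ (n : Nat) (j : Int), (stop - j).toNat ≤ n →
      pvInnerA intervals cell_len cell j stop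
        = (PySem.List.pyRange j stop 1).any
            (fun jj => PySem.List.slice intervals (some jj) (some (jj + cell_len)) == cell) := by
  intro n
  induction n with
  | zero =>
      intro j h
      have hj : ¬ j < stop := by omega
      rw [pvInnerA, PySem.List.pyRange_one_eq_nil (by omega)]
      simp [hj]
  | succ n ih =>
      intro j h
      by_cases hj : j < stop
      · rw [pvInnerA, PySem.List.pyRange_one_cons (by omega)]
        simp only [dif_pos hj, List.any_cons]
        split_ifs with hs
        · simp [hs]
        · simp [hs, ih (j + 1) (by omega)]
      · rw [pvInnerA, PySem.List.pyRange_one_eq_nil (by omega)]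
        simp [hj]

-- A's outer loop is a countP of its inner search
lemma pvA_eq (intervals : List Int) (cell_len : Int) :
    ∀ (l : List Int) (c : Int),
      l.foldl (fun count i =>
        let cell := PySem.List.slice intervals (some i) (some (i + cell_len))
        if pvInnerA intervals cell_len cell (i + cell_len) ((intervals.length : Int) - cell_len + 1)
        then count + 1 else count) c
      = c + (l.countP (fun i =>
          pvInnerA intervals cell_len (PySem.List.slice intervals (some i) (some (i + cell_len)))
            (i + cell_len) ((intervals.length : Int) - cell_len + 1)) : Int) := by
  intro l
  induction l with
  | nil => simp
  | cons a t ih =>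
      intro c
      simp only [List.foldl_cons, List.countP_cons, ih]
      split_ifs with h
      · push_cast; ring
      · push_cast; ring

-- B's descending sweep counts the same predicate, by the set invariant
lemma pv_loopB (intervals : List Int) (cell_len m : Int) :
    ∀ (k : Nat) (count : Int) (seen : PySem.Set (List Int)) (next_j : Int),
      (∀ x, x ∈ seen ↔ ∃ j : Int, next_j < j ∧ j ≤ m ∧ x = pvW intervals cell_len j) →
      next_j ≤ m →
      ((k : Int) + cell_len - 1 ≤ next_j ∨ next_j = m) →
      (((List.range k).map (fun t : Nat => (t : Int))).reverse.foldl (pvStep intervals cell_len)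
          (count, seen, next_j)).1
        = count + ((List.range k).countP
            (fun t : Nat => (PySem.List.pyRange ((t : Int) + cell_len) (m + 1) 1).any
              (fun j => pvW intervals cell_len j == pvW intervals cell_len (t : Int))) : Int) := by
  intro k
  induction k with
  | zero => intro count seen next_j _ _ _; simp
  | succ k ih =>
      intro count seen next_j Hseen Hle Hor
      rw [List.range_succ, List.map_append, List.reverse_append]
      simp only [List.map_cons, List.map_nil, List.reverse_cons, List.reverse_nil,
        List.nil_append, List.cons_append, List.foldl_cons]
      obtain ⟨hmem, hsnd⟩ := pvDrain_spec intervals cell_len ((k : Int) + cell_len)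
        (next_j - ((k : Int) + cell_len) + 1).toNat next_j (le_refl _) seen
      by_cases hcase : (k : Int) + cell_len ≤ next_j
      · -- the while loop drains down to k + cell_len
        have hmem' : ∀ x, x ∈ (pvDrain intervals cell_len seen next_j ((k : Int) + cell_len)).1 ↔
            ∃ j : Int, (k : Int) + cell_len - 1 < j ∧ j ≤ m ∧ x = pvW intervals cell_len j := by
          intro x
          rw [hmem x]
          constructor
          · rintro (hx | ⟨j, h1, h2, h3⟩)
            · obtain ⟨j, h1, h2, h3⟩ := (Hseen x).1 hx
              exact ⟨j, by omega, h2, h3⟩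
            · exact ⟨j, by omega, by omega, h3⟩
          · rintro ⟨j, h1, h2, h3⟩
            by_cases hj : j ≤ next_j
            · exact Or.inr ⟨j, by omega, hj, h3⟩
            · exact Or.inl ((Hseen x).2 ⟨j, by omega, h2, h3⟩)
        have hb : PySem.Set.contains (pvDrain intervals cell_len seen next_j ((k : Int) + cell_len)).1
              (PySem.List.slice intervals (some ((k : Int))) (some ((k : Int) + cell_len)))
            = (PySem.List.pyRange ((k : Int) + cell_len) (m + 1) 1).any
              (fun j => pvW intervals cell_len j == pvW intervals cell_len (k : Int)) := by
          rw [Bool.eq_iff_iff]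
          rw [PySem.Set.contains_iff, List.any_eq_true]
          constructor
          · intro hx
            obtain ⟨j, h1, h2, h3⟩ := (hmem' _).1 hx
            refine ⟨j, ?_, ?_⟩
            · rw [PySem.List.mem_pyRange_one]; omega
            · simp only [beq_iff_eq]
              exact h3.symm
          · rintro ⟨j, hjmem, hjeq⟩
            rw [PySem.List.mem_pyRange_one] at hjmem
            simp only [beq_iff_eq] at hjeq
            exact (hmem' _).2 ⟨j, by omega, by omega, hjeq.symm⟩
        rw [show pvStep intervals cell_len (count, seen, next_j) ((k : Int)) =
            (if (PySem.List.pyRange ((k : Int) + cell_len) (m + 1) 1).any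
                (fun j => pvW intervals cell_len j == pvW intervals cell_len (k : Int))
             then count + 1 else count,
             (pvDrain intervals cell_len seen next_j ((k : Int) + cell_len)).1,
             (pvDrain intervals cell_len seen next_j ((k : Int) + cell_len)).2) from by
          simp only [pvStep, hb, hsnd]
          split_ifs <;> simp]
        rw [hsnd, if_pos hcase]
        rw [ih _ _ _ (by simpa using hmem') (by omega) (Or.inl (by omega))]
        rw [List.countP_append]
        simp only [List.countP_cons, List.countP_nil]
        split_ifs <;> push_cast <;> ring
      · -- nothing to drain: next_j = m and the window range is empty
        have hnj : next_j = m := by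
          rcases Hor with h1 | h1
          · omega
          · exact h1
        have hempty : PySem.List.pyRange ((k : Int) + cell_len) (m + 1) 1 = [] :=
          PySem.List.pyRange_one_eq_nil (by omega)
        have hmem' : ∀ x, x ∈ (pvDrain intervals cell_len seen next_j ((k : Int) + cell_len)).1 ↔
            x ∈ seen := by
          intro x
          rw [hmem x]
          constructor
          · rintro (hx | ⟨j, h1, h2, _⟩)
            · exact hx
            · omega
          · exact Or.inl
        have hb : PySem.Set.contains (pvDrain intervals cell_len seen next_j ((k : Int) + cell_len)).1
              (PySem.List.slice intervals (some ((k : Int))) (some ((k : Int) + cell_len)))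
            = false := by
          rw [Bool.eq_false_iff, Ne, PySem.Set.contains_iff]
          intro hx
          obtain ⟨j, h1, h2, _⟩ := (Hseen _).1 ((hmem' _).1 hx)
          omega
        rw [show pvStep intervals cell_len (count, seen, next_j) ((k : Int)) =
            (count, (pvDrain intervals cell_len seen next_j ((k : Int) + cell_len)).1,
             (pvDrain intervals cell_len seen next_j ((k : Int) + cell_len)).2) from by
          simp only [pvStep, hb]
          simp]
        rw [hsnd, if_neg hcase]
        rw [ih _ _ _ (fun x => (hmem' x).trans (Hseen x)) Hle (Or.inr hnj)]
        rw [List.countP_append]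
        simp only [List.countP_cons, List.countP_nil]
        rw [hempty]
        simp

-- ===== VERDICT (by name: the statement is the Claim_ definition above) =====
theorem find_repeated_cells_py_spec : Claim_equal_find_repeated_cells_py := by
  intro intervals cell_len _
  unfold Spec_find_repeated_cells_py find_repeated_cells_py find_repeated_cells_py_alt
  by_cases h : (intervals.length : Int) < cell_len
  · rw [if_pos h, if_pos h]
  · rw [if_neg h, if_neg h]
    have hm0 : 0 ≤ (intervals.length : Int) - cell_len := by omega
    have hr : PySem.List.pyRange 0 ((intervals.length : Int) - cell_len) 1
        = (List.range ((intervals.length : Int) - cell_len).toNat).map (fun t : Nat => (t : Int)) := by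
      rw [PySem.List.pyRange_one]
      simp
    rw [hr, pvA_eq]
    rw [pv_loopB intervals cell_len ((intervals.length : Int) - cell_len)
      ((intervals.length : Int) - cell_len).toNat 0 PySem.Set.empty
      ((intervals.length : Int) - cell_len)
      (by intro x; constructor
          · intro hx; exact absurd hx (List.not_mem_nil)
          · rintro ⟨j, h1, h2, _⟩; omega)
      (le_refl _) (Or.inr rfl)]
    rw [List.countP_map]
    simp only [Function.comp_def, pvW, zero_add]
    norm_cast
    apply List.countP_congr
    intro t _
    rw [pvInnerA_eq_any _ _ _ _ _ _ (le_refl _)]
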